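-- pv_equiv track=rewrite | github.com/enigmasteron32/usc-bbdly | analysis/bussiness_logic.py | update_y_daily_array
-- ===== SOURCE A (Python) =====
-- def update_y_daily_array(X,y,timestamp,amount):
--     target_index = 0
--     for i in range(len(X)):
--         x_time = X[i]
--         if timestamp < x_time:
--             target_index = i
--             break
--     y[target_index] += amount
--     return y
-- ===== SOURCE B (Python) =====
-- def update_y_daily_array(X, y, timestamp, amount):
--     # Right-to-left break-free scan: the last assignment (smallest i) wins,
--     # so k ends as the first index with timestamp < X[i], or 0 if none.
--     k = 0
--     for i in range(len(X) - 1, -1, -1):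
--         if timestamp < X[i]:
--             k = i
--     y[k] += amount
--     return y
-- ===== Notes on version B (the rewrite author's own statement) =====
-- stated objective: alternative
-- what changed: B scans X right-to-left with a break-free loop whose last assignment yields the leftmost qualifying index, instead of A's left-to-right scan with an early break.
import Mathlib
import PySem

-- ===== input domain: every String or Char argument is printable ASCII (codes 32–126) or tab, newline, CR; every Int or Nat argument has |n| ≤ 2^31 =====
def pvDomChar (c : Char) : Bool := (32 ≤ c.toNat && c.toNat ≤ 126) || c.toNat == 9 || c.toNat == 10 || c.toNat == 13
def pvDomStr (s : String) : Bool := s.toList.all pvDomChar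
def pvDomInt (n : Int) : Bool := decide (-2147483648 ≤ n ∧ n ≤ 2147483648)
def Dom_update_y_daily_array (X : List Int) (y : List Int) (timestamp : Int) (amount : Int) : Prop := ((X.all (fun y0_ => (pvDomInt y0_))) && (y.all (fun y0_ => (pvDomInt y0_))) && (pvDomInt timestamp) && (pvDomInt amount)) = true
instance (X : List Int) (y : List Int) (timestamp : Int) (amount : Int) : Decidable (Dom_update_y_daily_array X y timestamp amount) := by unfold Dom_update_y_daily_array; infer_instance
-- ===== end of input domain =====

-- B replaces A's left-to-right scan-with-break by a right-to-left break-free scan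
-- (objective: alternative); equivalence is about the RETURN value — both Pythons
-- also mutate y in place identically.

-- ===== PORT A =====
-- A's loop: for i in range(len(X)): if timestamp < X[i]: target_index = i; break
-- (target_index stays 0 when the loop completes without a break)
def pvAFind : List Int → Int → Nat → Nat
  | [], _, _ => 0
  | x :: xs, t, i => if t < x then i else pvAFind xs t (i + 1)

def update_y_daily_array (X : List Int) (y : List Int) (timestamp : Int) (amount : Int) : List Int :=
  let k := pvAFind X timestamp 0
  -- y[k] += amount; Python raises IndexError when k ≥ len(y): excluded by Pre_
  y.set k (y.getD k 0 + amount)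

-- ===== PORT B =====
def update_y_daily_array_alt (X : List Int) (y : List Int) (timestamp : Int) (amount : Int) : List Int :=
  -- for i in range(len(X)-1, -1, -1): if timestamp < X[i]: k = i
  let k := (List.range X.length).reverse.foldl
    (fun k i => if timestamp < X.getD i 0 then i else k) 0
  -- y[k] += amount; Python raises IndexError when k ≥ len(y): excluded by Pre_
  y.set k (y.getD k 0 + amount)

-- ===== PRECONDITION & SPEC =====
-- Excludes exactly the inputs where Python A raises IndexError: y empty, or some
-- element of X exceeds timestamp but none within the first len(y) positions does
-- (then the chosen index is out of range for y). B raises there too.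
def Pre_update_y_daily_array (X : List Int) (y : List Int) (timestamp : Int) (amount : Int) : Prop :=
  y ≠ [] ∧ (X.any (fun x => timestamp < x) = true → (X.take y.length).any (fun x => timestamp < x) = true)
instance (X : List Int) (y : List Int) (timestamp : Int) (amount : Int) : Decidable (Pre_update_y_daily_array X y timestamp amount) := by unfold Pre_update_y_daily_array; infer_instance

def pvWitness_update_y_daily_array : List Int × List Int × Int × Int := ([3, 7], [0, 0], 1, 5)

def Spec_update_y_daily_array (X : List Int) (y : List Int) (timestamp : Int) (amount : Int) (out : List Int) : Prop := out = update_y_daily_array_alt X y timestamp amount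
instance (X : List Int) (y : List Int) (timestamp : Int) (amount : Int) (out : List Int) : Decidable (Spec_update_y_daily_array X y timestamp amount out) := by unfold Spec_update_y_daily_array; infer_instance

-- ===== CLAIM (what is proved, stated in full; the proofs are below) =====
def Claim_equal_update_y_daily_array : Prop := ∀ (X : List Int) (y : List Int) (timestamp : Int) (amount : Int), Dom_update_y_daily_array X y timestamp amount → Pre_update_y_daily_array X y timestamp amount → Spec_update_y_daily_array X y timestamp amount (update_y_daily_array X y timestamp amount)

-- ===== LEMMAS AND PROOFS =====

-- A's scan computes the first qualifying index (offset by the accumulator), else 0.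
theorem pvAFind_eq_findIdx? (xs : List Int) (t : Int) (i : Nat) :
    pvAFind xs t i = match xs.findIdx? (fun x => t < x) with
      | some j => i + j
      | none => 0 := by
  induction xs generalizing i with
  | nil => simp [pvAFind]
  | cons x xs ih =>
    simp only [pvAFind, List.findIdx?_cons]
    by_cases h : t < x
    · simp [h]
    · simp only [h, decide_false, Bool.false_eq_true, ite_false]
      rw [ih]
      cases hf : xs.findIdx? (fun x => decide (t < x)) with
      | none => simp
      | some j =>
        simp only [Option.map_some]
        ring

-- A fold over a range from the right computes the first index satisfying P, else the seed.
theorem pvFoldr_range_find (P : Nat → Bool) (n : Nat) (a : Nat) :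
    (List.range n).foldr (fun i k => if P i then i else k) a =
      match (List.range n).find? P with
      | some i => i
      | none => a := by
  induction n generalizing a with
  | zero => simp
  | succ n ih =>
    rw [List.range_succ, List.foldr_append, List.find?_append]
    rw [ih]
    cases hf : (List.range n).find? P <;> simp [List.find?] <;> by_cases h : P n <;> simp [h]

-- Searching indices of xs equals findIdx? on xs.
theorem pvFind_range_eq_findIdx? (xs : List Int) (p : Int → Bool) :
    (List.range xs.length).find? (fun i => p (xs.getD i 0)) = xs.findIdx? p := by
  induction xs with
  | nil => simp
  | cons x xs ih =>
    rw [List.length_cons, List.range_succ_eq_map, List.find?_cons]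
    by_cases h : p x
    · simp [List.findIdx?_cons, h]
    · simp only [List.getD_cons_zero, h]
      rw [List.find?_map]
      simp only [Function.comp_def, List.getD_cons_succ]
      rw [ih, List.findIdx?_cons]
      simp [h]

theorem pvIndex_eq (X : List Int) (t : Int) :
    (List.range X.length).reverse.foldl (fun k i => if t < X.getD i 0 then i else k) 0 =
      pvAFind X t 0 := by
  rw [List.foldl_reverse]
  have : (fun (i : Nat) (k : Nat) => if t < X.getD i 0 then i else k)
       = (fun i k => if (fun j => decide (t < X.getD j 0)) i then i else k) := by
    funext i k; simp
  have h2 := pvFind_range_eq_findIdx? X (fun x => decide (t < x))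
  rw [this, pvFoldr_range_find, h2, pvAFind_eq_findIdx?]
  cases hf : X.findIdx? (fun x => decide (t < x)) <;> simp

-- ===== VERDICT (by name: the statement is the Claim_ definition above) =====
theorem update_y_daily_array_spec : Claim_equal_update_y_daily_array := by
  intro X y timestamp amount _ _
  unfold Spec_update_y_daily_array update_y_daily_array update_y_daily_array_alt
  rw [pvIndex_eq]
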